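-- pv_equiv track=rewrite | github.com/QitaoXu/Lintcode | interviews/A/VO/pairCount.py | getValidPairCount
-- ===== SOURCE A (Python) =====
-- def getValidPairCount(pairs):
--
--     if not pairs:
--         return 0
--
--     count = 0
--     pair_set = set()
--
--     for (x, y) in pairs:
--
--         if (x, y) in pair_set:
--             count += 1
--
--         else:
--             pair_set.add((x, y))
--             pair_set.add((y, x))
--
--     return count
-- ===== SOURCE B (Python) =====
-- def getValidPairCount(pairs):
--     counts = {}
--     for (x, y) in pairs:
--         k = frozenset((x, y))
--         counts[k] = counts.get(k, 0) + 1
--     return sum(v - 1 for v in counts.values())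
-- ===== Notes on version B (the rewrite author's own statement) =====
-- stated objective: alternative
-- what changed: B replaces A's online seen-set with duplicate counter by a grouping pass: it builds a multiset (dict of occurrence counts keyed by the unordered pair) and then aggregates sum(v - 1) over the counts, so repeats are computed from the histogram rather than detected during the scan.
import Mathlib
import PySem

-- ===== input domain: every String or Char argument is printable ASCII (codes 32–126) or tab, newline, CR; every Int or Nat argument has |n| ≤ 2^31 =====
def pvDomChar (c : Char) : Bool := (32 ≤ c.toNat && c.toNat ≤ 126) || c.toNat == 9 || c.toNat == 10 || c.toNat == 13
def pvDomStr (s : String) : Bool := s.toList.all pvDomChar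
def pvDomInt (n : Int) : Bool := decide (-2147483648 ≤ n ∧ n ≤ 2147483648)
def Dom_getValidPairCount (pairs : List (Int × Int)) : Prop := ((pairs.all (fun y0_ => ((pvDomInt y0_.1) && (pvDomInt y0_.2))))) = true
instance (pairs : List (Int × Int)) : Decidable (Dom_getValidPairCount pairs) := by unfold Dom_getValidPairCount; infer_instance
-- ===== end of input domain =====

-- B groups the pairs into a histogram keyed by the unordered pair and returns sum(v-1)
-- over the counts, instead of A's online seen-set with a running duplicate counter;
-- objective: alternative (same asymptotic cost, different algorithmic decomposition).

-- ===== PORT A =====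
def getValidPairCount (pairs : List (Int × Int)) : Int :=
  if pairs = [] then 0
  else
    (pairs.foldl
      (fun (st : Int × PySem.Set (Int × Int)) p =>
        if PySem.Set.contains st.2 (p.1, p.2) then (st.1 + 1, st.2)
        else (st.1, PySem.Set.add (PySem.Set.add st.2 (p.1, p.2)) (p.2, p.1)))
      (0, PySem.Set.empty)).1

-- ===== PORT B =====
-- frozenset((x, y)) over two Ints: modelled exactly by the sorted canonical pair
def canonKey (x y : Int) : Int × Int := if x ≤ y then (x, y) else (y, x)

def getValidPairCount_alt (pairs : List (Int × Int)) : Int :=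
  let counts := pairs.foldl
    (fun (d : PySem.Dict (Int × Int) Int) p =>
      let k := canonKey p.1 p.2
      d.insert k (d.getD k 0 + 1))
    PySem.Dict.empty
  (counts.values.map (fun v => v - 1)).sum

-- ===== PRECONDITION & SPEC =====
def Spec_getValidPairCount (pairs : List (Int × Int)) (out : Int) : Prop := out = getValidPairCount_alt pairs
instance (pairs : List (Int × Int)) (out : Int) : Decidable (Spec_getValidPairCount pairs out) := by unfold Spec_getValidPairCount; infer_instance

-- ===== CLAIM (what is proved, stated in full; the proofs are below) =====
def Claim_equal_getValidPairCount : Prop := ∀ (pairs : List (Int × Int)), Dom_getValidPairCount pairs → Spec_getValidPairCount pairs (getValidPairCount pairs)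

-- ===== LEMMAS AND PROOFS =====

theorem canonKey_eq_iff (a b x y : Int) :
    canonKey a b = canonKey x y ↔ ((a, b) = (x, y) ∨ (a, b) = (y, x)) := by
  simp only [canonKey]
  split_ifs <;> simp only [Prod.mk.injEq] <;> omega

-- A's loop, compared with the auxiliary fold that counts the pairs and collects
-- the canonical key of each pair into a set.
theorem loop_inv (pairs : List (Int × Int)) (c n : Int)
    (sA sB : PySem.Set (Int × Int))
    (hlen : c + PySem.Set.len sB = n)
    (hmem : ∀ a b : Int, ((a, b) ∈ sA ↔ canonKey a b ∈ sB)) :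
    (pairs.foldl
      (fun (st : Int × PySem.Set (Int × Int)) p =>
        if PySem.Set.contains st.2 (p.1, p.2) then (st.1 + 1, st.2)
        else (st.1, PySem.Set.add (PySem.Set.add st.2 (p.1, p.2)) (p.2, p.1)))
      (c, sA)).1
    =
    (pairs.foldl
      (fun (st : Int × PySem.Set (Int × Int)) p =>
        (st.1 + 1, PySem.Set.add st.2 (canonKey p.1 p.2)))
      (n, sB)).1
    - PySem.Set.len
      ((pairs.foldl
        (fun (st : Int × PySem.Set (Int × Int)) p =>
          (st.1 + 1, PySem.Set.add st.2 (canonKey p.1 p.2)))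
        (n, sB)).2) := by
  induction pairs generalizing c n sA sB with
  | nil => simp only [List.foldl_nil]; omega
  | cons p rest ih =>
    obtain ⟨x, y⟩ := p
    simp only [List.foldl_cons]
    by_cases hc : (x, y) ∈ sA
    · have hcb : PySem.Set.contains sA (x, y) = true := by
        simpa [PySem.Set.contains] using hc
      have hkb : canonKey x y ∈ sB := (hmem x y).mp hc
      rw [hcb]
      simp only [if_true]
      have hadd : PySem.Set.add sB (canonKey x y) = sB := PySem.Set.add_of_mem hkb
      rw [hadd]
      exact ih (c + 1) (n + 1) sA sB (by omega) hmem
    · have hcb : PySem.Set.contains sA (x, y) = false := by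
        simpa [PySem.Set.contains] using hc
      have hkb : canonKey x y ∉ sB := fun h => hc ((hmem x y).mpr h)
      rw [hcb]
      simp only [Bool.false_eq_true, if_false]
      have hadd : PySem.Set.add sB (canonKey x y) = sB ++ [canonKey x y] :=
        PySem.Set.add_of_not_mem hkb
      rw [hadd]
      apply ih
      · have hstep : PySem.Set.len (sB ++ [canonKey x y]) = PySem.Set.len sB + 1 := by
          simp [PySem.Set.len]
        omega
      · intro a b
        constructor
        · intro h
          rcases (PySem.Set.mem_add _ _ _).mp h with h' | h'
          · rcases (PySem.Set.mem_add _ _ _).mp h' with h'' | h''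
            · exact List.mem_append_left _ ((hmem a b).mp h'')
            · refine List.mem_append_right _ ?_
              simp [(canonKey_eq_iff a b x y).mpr (Or.inl h'')]
          · refine List.mem_append_right _ ?_
            simp [(canonKey_eq_iff a b x y).mpr (Or.inr h')]
        · intro h
          rcases List.mem_append.mp h with h' | h'
          · exact (PySem.Set.mem_add _ _ _).mpr (Or.inl ((PySem.Set.mem_add _ _ _).mpr (Or.inl ((hmem a b).mpr h'))))
          · have : canonKey a b = canonKey x y := by simpa using h'
            rcases (canonKey_eq_iff a b x y).mp this with h'' | h''
            · exact (PySem.Set.mem_add _ _ _).mpr (Or.inl ((PySem.Set.mem_add _ _ _).mpr (Or.inr h'')))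
            · exact (PySem.Set.mem_add _ _ _).mpr (Or.inr h'')

theorem foldl_add_one (l : List (Int × Int)) (c : Int) :
    l.foldl (fun (s : Int) _ => s + 1) c = c + l.length := by
  induction l generalizing c with
  | nil => simp
  | cons x rest ih => simp [List.foldl_cons, ih]; omega

theorem sum_ite_eq_one (S : List (Int × Int)) (x : Int × Int)
    (hnd : S.Nodup) (hx : x ∈ S) :
    (S.map (fun k => if k = x then (1 : Int) else 0)).sum = 1 := by
  induction S with
  | nil => cases hx
  | cons y rest ih =>
    rcases List.mem_cons.mp hx with h | h
    · subst h
      have hnotin : x ∉ rest := (List.nodup_cons.mp hnd).1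
      have hz : (rest.map (fun k => if k = x then (1 : Int) else 0)).sum = 0 := by
        calc (rest.map (fun k => if k = x then (1 : Int) else 0)).sum
            = (rest.map (fun _ => (0 : Int))).sum := by
              refine congrArg List.sum (List.map_congr_left ?_)
              intro k hk
              have hne : k ≠ x := fun he => hnotin (he ▸ hk)
              simp [hne]
          _ = 0 := by simp
      simp [hz]
    · have hy : y ≠ x := by
        rintro rfl
        exact (List.nodup_cons.mp hnd).1 h
      simp only [List.map_cons, List.sum_cons, if_neg hy]
      rw [ih (List.nodup_cons.mp hnd).2 h]
      ring

-- Σ over a Nodup list S ⊇ ks of ks.count = ks.length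
theorem sum_map_count (ks : List (Int × Int)) (S : List (Int × Int))
    (hnd : S.Nodup) (hcov : ∀ k ∈ ks, k ∈ S) :
    (S.map (fun k => ((ks.count k : Nat) : Int))).sum = ks.length := by
  induction ks generalizing S with
  | nil => simp
  | cons x rest ih =>
    have hx : x ∈ S := hcov x (List.mem_cons_self)
    have hrest : ∀ k ∈ rest, k ∈ S := fun k hk => hcov k (List.mem_cons_of_mem _ hk)
    have hsplit : ∀ k, ((x :: rest).count k : Int)
        = (rest.count k : Int) + (if k = x then 1 else 0) := by
      intro k
      by_cases h : k = x
      · simp [h]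
      · simp [h, Ne.symm h]
    calc (S.map (fun k => (((x :: rest).count k : Nat) : Int))).sum
        = (S.map (fun k => ((rest.count k : Nat) : Int) + (if k = x then 1 else 0))).sum := by
          exact congrArg List.sum (List.map_congr_left (fun k _ => hsplit k))
      _ = (S.map (fun k => ((rest.count k : Nat) : Int))).sum
            + (S.map (fun k => if k = x then (1 : Int) else 0)).sum := by
          rw [← List.sum_map_add]
      _ = (rest.length : Int) + 1 := by
          rw [ih S hnd hrest, sum_ite_eq_one S x hnd hx]
      _ = ((x :: rest).length : Int) := by
          simp only [List.length_cons]
          push_cast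
          ring

-- ===== VERDICT (by name: the statement is the Claim_ definition above) =====
theorem getValidPairCount_spec : Claim_equal_getValidPairCount := by
  intro pairs _
  unfold Spec_getValidPairCount getValidPairCount getValidPairCount_alt
  -- identify B's dict with the counter of the canonical-key list
  have hB : pairs.foldl
      (fun (d : PySem.Dict (Int × Int) Int) p =>
        d.insert (canonKey p.1 p.2) (d.getD (canonKey p.1 p.2) 0 + 1))
      PySem.Dict.empty
      = PySem.Dict.counter (pairs.map (fun p => canonKey p.1 p.2)) := by
    rw [← PySem.Dict.foldl_insert_getD_add_one_eq_counter, List.foldl_map]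
  simp only []
  rw [hB]
  by_cases hnil : pairs = []
  · subst hnil
    simp [PySem.Dict.counter, PySem.Dict.values, PySem.Dict.empty]
  · rw [if_neg hnil]
    rw [loop_inv pairs 0 0 PySem.Set.empty PySem.Set.empty
      (by simp [PySem.Set.len, PySem.Set.empty])
      (by intro a b; simp [PySem.Set.empty])]
    rw [PySem.List.foldl_prod_mk (fun (s : Int) (_ : Int × Int) => s + 1)
        (fun (s : PySem.Set (Int × Int)) (p : Int × Int) => PySem.Set.add s (canonKey p.1 p.2))
        pairs 0 PySem.Set.empty]
    rw [← PySem.Set.update_map_eq_foldl_add pairs (fun p => canonKey p.1 p.2) PySem.Set.empty]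
    rw [foldl_add_one pairs 0]
    have hupd : PySem.Set.update PySem.Set.empty (pairs.map (fun p => canonKey p.1 p.2))
        = PySem.Set.ofList (pairs.map (fun p => canonKey p.1 p.2)) :=
      PySem.Set.update_nil_left _
    rw [hupd]
    set ks := pairs.map (fun p => canonKey p.1 p.2) with hks
    have hS : ((PySem.Set.ofList ks).map (fun k => ((ks.count k : Nat) : Int))).sum
        = (ks.length : Int) :=
      sum_map_count ks (PySem.Set.ofList ks) (PySem.Set.nodup_ofList ks)
        (fun k hk => (PySem.Set.mem_ofList _ _).mpr hk)
    simp only [PySem.Dict.values, PySem.Dict.items_counter, List.map_map, Function.comp_def,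
      PySem.Set.len]
    have hsplit : ((PySem.Set.ofList ks).map (fun k => ((ks.count k : Nat) : Int) + (-1))).sum
        = ((PySem.Set.ofList ks).map (fun k => ((ks.count k : Nat) : Int))).sum
          + ((PySem.Set.ofList ks).map (fun _ => (-1 : Int))).sum :=
      PySem.List.sum_map_add_int _ _ _
    have hconst : ((PySem.Set.ofList ks).map (fun _ => (-1 : Int))).sum
        = ((PySem.Set.ofList ks).length : Int) * (-1) :=
      PySem.List.sum_map_const_int _ _
    have hgoal : ((PySem.Set.ofList ks).map (fun k => ((ks.count k : Nat) : Int) - 1)).sum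
        = (ks.length : Int) - ((PySem.Set.ofList ks).length : Int) := by
      calc ((PySem.Set.ofList ks).map (fun k => ((ks.count k : Nat) : Int) - 1)).sum
          = ((PySem.Set.ofList ks).map (fun k => ((ks.count k : Nat) : Int) + (-1))).sum := by
            exact congrArg List.sum (List.map_congr_left (fun k _ => by ring))
        _ = (ks.length : Int) - ((PySem.Set.ofList ks).length : Int) := by
            rw [hsplit, hconst, hS]; ring
    have hkl : (ks.length : Int) = (pairs.length : Int) := by simp [hks]
    rw [hgoal]
    omega
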